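-- pv_equiv track=rewrite | github.com/antoneklund/ordsprak | ordsprak_markov.py | filter_sentence
-- ===== SOURCE A (Python) =====
-- BAD_CHARS = [',', '<', '>', '!', '?', '-','<', ':',';','*', '(', ')']
--
-- def filter_sentence(sentence):
--     filtered = ""
--     for char in sentence:
--         if char not in BAD_CHARS:
--             if char == '.':
--                 break
--             else:
--                 filtered = filtered + char
--     return filtered
-- ===== SOURCE B (Python) =====
-- BAD_CHARS = [',', '<', '>', '!', '?', '-','<', ':',';','*', '(', ')']
--
-- def filter_sentence(sentence):
--     idx = sentence.find('.')
--     head = sentence if idx == -1 else sentence[:idx]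
--     return ''.join(c for c in head if c not in BAD_CHARS)
-- ===== Notes on version B (the rewrite author's own statement) =====
-- stated objective: simpler
-- what changed: Replaces the single intertwined loop (membership test, break-on-period and per-char string concatenation) with a two-pass find-then-filter structure: truncate at the first period via str.find and a slice, then remove BAD_CHARS with a join over a generator.
import Mathlib
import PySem

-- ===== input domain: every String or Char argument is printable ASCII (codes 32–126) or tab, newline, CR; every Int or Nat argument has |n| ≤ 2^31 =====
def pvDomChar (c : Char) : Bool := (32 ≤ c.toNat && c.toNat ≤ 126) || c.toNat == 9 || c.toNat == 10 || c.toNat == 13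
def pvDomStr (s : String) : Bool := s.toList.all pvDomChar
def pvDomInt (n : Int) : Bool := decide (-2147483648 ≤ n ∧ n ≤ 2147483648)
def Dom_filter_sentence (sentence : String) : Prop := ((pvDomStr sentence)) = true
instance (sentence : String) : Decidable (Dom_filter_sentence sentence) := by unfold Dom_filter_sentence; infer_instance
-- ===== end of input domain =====

-- B replaces A's single intertwined loop (membership test + break-on-'.' + concatenation) by a
-- two-pass find-then-slice-then-filter structure; objective: simpler. Equivalence on all of Dom.

-- ===== PORT A =====
def pvBadChars : List Char := [',', '<', '>', '!', '?', '-', '<', ':', ';', '*', '(', ')']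

-- the 'for char in sentence' loop with its early break, accumulator 'filtered'
def pvLoopA : List Char → List Char → List Char
  | acc, [] => acc
  | acc, c :: rest =>
    if pvBadChars.contains c then pvLoopA acc rest
    else if c = '.' then acc
    else pvLoopA (acc ++ [c]) rest

def filter_sentence (sentence : String) : String :=
  String.ofList (pvLoopA [] sentence.toList)

-- ===== PORT B =====
def filter_sentence_alt (sentence : String) : String :=
  let cs := sentence.toList
  let idx := PySem.Chars.find cs ['.']
  let head := if idx = -1 then cs else PySem.Chars.slice cs none (some idx)
  String.ofList (head.filter (fun c => !pvBadChars.contains c))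

-- ===== PRECONDITION & SPEC =====
def Spec_filter_sentence (sentence : String) (out : String) : Prop := out = filter_sentence_alt sentence
instance (sentence : String) (out : String) : Decidable (Spec_filter_sentence sentence out) := by unfold Spec_filter_sentence; infer_instance

-- ===== CLAIM (what is proved, stated in full; the proofs are below) =====
def Claim_equal_filter_sentence : Prop := ∀ (sentence : String), Dom_filter_sentence sentence → Spec_filter_sentence sentence (filter_sentence sentence)

-- ===== LEMMAS AND PROOFS =====

-- A's loop filters the prefix up to (excluding) the first '.'
theorem pvLoopA_eq (cs acc : List Char) :
    pvLoopA acc cs = acc ++ (cs.takeWhile (fun c => c ≠ '.')).filter (fun c => !pvBadChars.contains c) := by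
  induction cs generalizing acc with
  | nil => simp [pvLoopA]
  | cons c rest ih =>
    by_cases hb : pvBadChars.contains c
    · have hdot : c ≠ '.' := by
        intro h; subst h; revert hb; decide
      have hb' : c ∈ pvBadChars := by simpa using hb
      simp [pvLoopA, hb', hdot, ih]
    · by_cases hd : c = '.'
      · subst hd
        have hnb : '.' ∉ pvBadChars := by decide
        simp [pvLoopA, hnb]
      · have hb' : c ∉ pvBadChars := by simpa using hb
        simp [pvLoopA, hb', hd, ih]

theorem take_eq_takeWhile (cs : List Char) (n : Nat)
    (h1 : cs[n]? = some '.') (h2 : ∀ i < n, cs[i]? ≠ some '.') :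
    cs.take n = cs.takeWhile (fun c => c ≠ '.') := by
  induction cs generalizing n with
  | nil => simp at h1
  | cons c rest ih =>
    cases n with
    | zero =>
      simp at h1
      subst h1
      simp
    | succ m =>
      have hc : c ≠ '.' := by
        have := h2 0 (Nat.succ_pos m)
        simpa using this
      simp only [List.getElem?_cons_succ] at h1
      have h2' : ∀ i < m, rest[i]? ≠ some '.' := by
        intro i hi
        have := h2 (i + 1) (Nat.succ_lt_succ hi)
        simpa using this
      simp [hc, List.take_succ_cons, ih m h1 h2']

-- a singleton list is a prefix of l.drop i exactly when l[i]? is that element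
theorem singleton_prefix_drop {l : List Char} {i : Nat} {a : Char} (h : l[i]? = some a) :
    [a] <+: l.drop i := by
  have hh : (l.drop i).head? = some a := by rw [List.head?_drop]; exact h
  cases hd : l.drop i with
  | nil => rw [hd] at hh; simp at hh
  | cons b t =>
    rw [hd] at hh
    simp at hh
    subst hh
    exact ⟨t, rfl⟩

-- the head computed by B is the maximal '.'-free prefix
theorem head_eq_takeWhile (cs : List Char) :
    (if PySem.Chars.find cs ['.'] = -1 then cs else PySem.Chars.slice cs none (some (PySem.Chars.find cs ['.'])))
      = cs.takeWhile (fun c => c ≠ '.') := by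
  by_cases h : PySem.Chars.find cs ['.'] = -1
  · rw [if_pos h]
    have hnot : ¬ ['.'] <:+: cs := (PySem.Chars.find_eq_neg_one_iff cs ['.']).mp h
    symm
    rw [List.takeWhile_eq_self_iff]
    intro x hx
    simp only [decide_eq_true_eq]
    intro he
    subst he
    obtain ⟨s, t, hst⟩ := List.append_of_mem hx
    exact hnot ⟨s, t, by rw [hst]; simp⟩
  · rw [if_neg h]
    have hge : 0 ≤ PySem.Chars.find cs ['.'] := by
      have := PySem.Chars.neg_one_le_find cs ['.']
      omega
    obtain ⟨hpre, hmin⟩ := PySem.Chars.find_spec hge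
    set n := (PySem.Chars.find cs ['.']).toNat with hn
    have h1 : cs[n]? = some '.' := by
      obtain ⟨t, ht⟩ := hpre
      have : (cs.drop n).head? = some '.' := by rw [← ht]; rfl
      rw [List.head?_drop] at this
      exact this
    have h2 : ∀ i < n, cs[i]? ≠ some '.' := by
      intro i hi hsome
      exact hmin i hi (singleton_prefix_drop hsome)
    rw [PySem.Chars.slice_eq_listSlice, PySem.List.slice_to _ hge]
    exact take_eq_takeWhile cs n h1 h2

-- ===== VERDICT (by name: the statement is the Claim_ definition above) =====
theorem filter_sentence_spec : Claim_equal_filter_sentence := by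
  intro s _
  show filter_sentence s = filter_sentence_alt s
  simp only [filter_sentence, filter_sentence_alt]
  rw [pvLoopA_eq, head_eq_takeWhile]
  simp
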